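-- pv_equiv track=rewrite | github.com/NolanChai/graphframe-neo4j | src/graphframe_neo4j/frames/compiler.py | _compile_traversal_select_clause
-- ===== SOURCE A (Python) =====
-- from typing import Any, Dict, List, Optional, Tuple
--
-- def _compile_traversal_select_clause(
--
--     fields: List[str],
--     from_alias: str = "from",
--     rel_alias: str = "rel",
--     to_alias: str = "to"
-- ) -> str:
--     """Compile SELECT clause for traversal queries with namespacing."""
--     if not fields:
--         # Return all aliases by default
--         return f"{from_alias}, {rel_alias}, {to_alias}"
--
--     # Handle special cases and field mapping
--     compiled_fields = []
--     for field in fields: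
--         if field == "*":
--             compiled_fields.append(f"{from_alias}, {rel_alias}, {to_alias}")
--         elif field.startswith(f"{from_alias}__"):
--             prop = field[len(f"{from_alias}__"):]
--             compiled_fields.append(f"{from_alias}.{prop}")
--         elif field.startswith(f"{rel_alias}__"):
--             prop = field[len(f"{rel_alias}__"):]
--             compiled_fields.append(f"{rel_alias}.{prop}")
--         elif field.startswith(f"{to_alias}__"):
--             prop = field[len(f"{to_alias}__"):]
--             compiled_fields.append(f"{to_alias}.{prop}")
--         elif field.startswith("from__"):
--             prop = field[len("from__"):]
--             compiled_fields.append(f"{from_alias}.{prop}")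
--         elif field.startswith("rel__"):
--             prop = field[len("rel__"):]
--             compiled_fields.append(f"{rel_alias}.{prop}")
--         elif field.startswith("to__"):
--             prop = field[len("to__"):]
--             compiled_fields.append(f"{to_alias}.{prop}")
--         else:
--             # Default to 'from' alias if no prefix
--             compiled_fields.append(f"{from_alias}.{field}")
--
--     return ", ".join(compiled_fields)
-- ===== SOURCE B (Python) =====
-- def _compile_traversal_select_clause(
--     fields,
--     from_alias: str = "from",
--     rel_alias: str = "rel",
--     to_alias: str = "to",
-- ) -> str:
--     # Staged passes: start with a per-field Option column ('*' resolved up front),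
--     # then one whole-column pass per prefix fills still-empty slots, then a final
--     # pass defaults the rest -- loop interchange vs A's per-field if/elif chain.
--     star = f"{from_alias}, {rel_alias}, {to_alias}"
--     if not fields:
--         return star
--     out = [star if f == "*" else None for f in fields]
--     for prefix, alias in (
--         (from_alias + "__", from_alias),
--         (rel_alias + "__", rel_alias),
--         (to_alias + "__", to_alias),
--         ("from__", from_alias),
--         ("rel__", rel_alias),
--         ("to__", to_alias),
--     ):
--         out = [
--             o if o is not None
--             else (alias + "." + f[len(prefix):] if f.startswith(prefix) else None)
--             for f, o in zip(fields, out)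
--         ]
--     return ", ".join(
--         o if o is not None else from_alias + "." + f for f, o in zip(fields, out)
--     )
-- ===== Notes on version B (the rewrite author's own statement) =====
-- stated objective: alternative
-- what changed: Loop interchange: instead of A's per-field seven-way if/elif chain, B keeps a column of Option results ('*' resolved up front) and runs one whole-column pass per prefix that fills still-empty slots, then a final defaulting pass; same output by first-match priority.
import Mathlib
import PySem

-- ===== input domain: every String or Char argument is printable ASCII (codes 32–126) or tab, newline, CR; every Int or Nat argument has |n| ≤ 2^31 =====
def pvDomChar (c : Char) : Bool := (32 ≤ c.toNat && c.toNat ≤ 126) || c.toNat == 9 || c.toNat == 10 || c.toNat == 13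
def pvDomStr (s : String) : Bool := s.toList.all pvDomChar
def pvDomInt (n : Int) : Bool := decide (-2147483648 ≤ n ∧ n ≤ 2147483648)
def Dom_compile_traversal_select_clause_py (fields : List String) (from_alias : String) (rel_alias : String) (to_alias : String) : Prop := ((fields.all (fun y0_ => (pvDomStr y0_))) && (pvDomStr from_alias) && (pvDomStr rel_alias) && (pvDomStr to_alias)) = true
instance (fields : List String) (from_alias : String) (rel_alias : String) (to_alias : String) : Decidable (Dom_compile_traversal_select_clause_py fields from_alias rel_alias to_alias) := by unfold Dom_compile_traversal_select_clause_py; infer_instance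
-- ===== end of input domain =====

-- B is a loop interchange of A: instead of a per-field if/elif prefix chain, B keeps a
-- column of Option results ('*' resolved up front), runs one whole-column pass per prefix
-- filling still-empty slots, then a final defaulting pass (alternative decomposition).


-- ===== PORT A =====
-- literal port of A's if/elif chain for one field
def pvChainA (from_alias rel_alias to_alias field : String) : String :=
  if field == "*" then
    from_alias ++ ", " ++ rel_alias ++ ", " ++ to_alias
  else if PySem.Str.startswith field (from_alias ++ "__") then
    from_alias ++ "." ++ PySem.Str.slice field (some (PySem.Str.len (from_alias ++ "__"))) none
  else if PySem.Str.startswith field (rel_alias ++ "__") then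
    rel_alias ++ "." ++ PySem.Str.slice field (some (PySem.Str.len (rel_alias ++ "__"))) none
  else if PySem.Str.startswith field (to_alias ++ "__") then
    to_alias ++ "." ++ PySem.Str.slice field (some (PySem.Str.len (to_alias ++ "__"))) none
  else if PySem.Str.startswith field "from__" then
    from_alias ++ "." ++ PySem.Str.slice field (some (PySem.Str.len "from__")) none
  else if PySem.Str.startswith field "rel__" then
    rel_alias ++ "." ++ PySem.Str.slice field (some (PySem.Str.len "rel__")) none
  else if PySem.Str.startswith field "to__" then
    to_alias ++ "." ++ PySem.Str.slice field (some (PySem.Str.len "to__")) none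
  else
    from_alias ++ "." ++ field

def compile_traversal_select_clause_py (fields : List String) (from_alias : String) (rel_alias : String) (to_alias : String) : String :=
  if fields = [] then
    from_alias ++ ", " ++ rel_alias ++ ", " ++ to_alias
  else
    PySem.Str.join ", " (fields.map (pvChainA from_alias rel_alias to_alias))

-- ===== PORT B =====
-- one whole-column pass for one (prefix, alias) pair: fill still-empty slots
def pvPassB (fields : List String) (prefix_ alias_ : String) (out : List (Option String)) : List (Option String) :=
  List.zipWith (fun f o =>
    match o with
    | some s => some s
    | none =>
      if PySem.Str.startswith f prefix_ then
        some (alias_ ++ "." ++ PySem.Str.slice f (some (PySem.Str.len prefix_)) none)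
      else none) fields out

def compile_traversal_select_clause_py_alt (fields : List String) (from_alias : String) (rel_alias : String) (to_alias : String) : String :=
  let star := from_alias ++ ", " ++ rel_alias ++ ", " ++ to_alias
  if fields = [] then star
  else
    let out0 := fields.map (fun f => if f == "*" then some star else none)
    let out := [(from_alias ++ "__", from_alias), (rel_alias ++ "__", rel_alias),
                (to_alias ++ "__", to_alias), ("from__", from_alias),
                ("rel__", rel_alias), ("to__", to_alias)].foldl
      (fun o pa => pvPassB fields pa.1 pa.2 o) out0
    PySem.Str.join ", "
      (List.zipWith (fun f o =>
        match o with
        | some s => s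
        | none => from_alias ++ "." ++ f) fields out)

-- ===== PRECONDITION & SPEC =====
def Spec_compile_traversal_select_clause_py (fields : List String) (from_alias : String) (rel_alias : String) (to_alias : String) (out : String) : Prop := out = compile_traversal_select_clause_py_alt fields from_alias rel_alias to_alias
instance (fields : List String) (from_alias : String) (rel_alias : String) (to_alias : String) (out : String) : Decidable (Spec_compile_traversal_select_clause_py fields from_alias rel_alias to_alias out) := by unfold Spec_compile_traversal_select_clause_py; infer_instance

-- ===== CLAIM (what is proved, stated in full; the proofs are below) =====
def Claim_equal_compile_traversal_select_clause_py : Prop := ∀ (fields : List String) (from_alias : String) (rel_alias : String) (to_alias : String), Dom_compile_traversal_select_clause_py fields from_alias rel_alias to_alias → Spec_compile_traversal_select_clause_py fields from_alias rel_alias to_alias (compile_traversal_select_clause_py fields from_alias rel_alias to_alias)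

-- ===== LEMMAS AND PROOFS =====
-- zipWith over a map of the same list is a map
theorem pv_zipWith_map {α β γ : Type} (g : α → β → γ) (h : α → β) (fs : List α) :
    List.zipWith g fs (fs.map h) = fs.map (fun f => g f (h f)) := by
  induction fs with
  | nil => rfl
  | cons f fs ih => simp [List.zipWith, ih]

-- the fold of whole-column passes is the per-element fold of the passes
theorem pv_fold_pass (table : List (String × String)) (fields : List String)
    (init : String → Option String) :
    table.foldl (fun o pa => pvPassB fields pa.1 pa.2 o) (fields.map init) =
      fields.map (fun f =>
        table.foldl (fun oo (pa : String × String) =>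
          match oo with
          | some s => some s
          | none =>
            if PySem.Str.startswith f pa.1 then
              some (pa.2 ++ "." ++ PySem.Str.slice f (some (PySem.Str.len pa.1)) none)
            else none) (init f)) := by
  induction table generalizing init with
  | nil => simp [List.foldl]
  | cons pa rest ih =>
    simp only [List.foldl, pvPassB, pv_zipWith_map]
    exact ih (fun f =>
      match init f with
      | some s => some s
      | none =>
        if PySem.Str.startswith f pa.1 then
          some (pa.2 ++ "." ++ PySem.Str.slice f (some (PySem.Str.len pa.1)) none)
        else none)

-- per-field: B's staged per-element fold equals A's if/elif chain
theorem pv_perField (from_alias rel_alias to_alias f : String) :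
    (match [(from_alias ++ "__", from_alias), (rel_alias ++ "__", rel_alias),
            (to_alias ++ "__", to_alias), ("from__", from_alias),
            ("rel__", rel_alias), ("to__", to_alias)].foldl
        (fun oo (pa : String × String) =>
          match oo with
          | some s => some s
          | none =>
            if PySem.Str.startswith f pa.1 then
              some (pa.2 ++ "." ++ PySem.Str.slice f (some (PySem.Str.len pa.1)) none)
            else none)
        (if f == "*" then some (from_alias ++ ", " ++ rel_alias ++ ", " ++ to_alias) else none) with
     | some s => s
     | none => from_alias ++ "." ++ f) = pvChainA from_alias rel_alias to_alias f := by
  simp only [List.foldl, pvChainA]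
  by_cases h0 : f == "*"
  · simp [h0]
  · simp only [h0, if_false, Bool.false_eq_true]
    by_cases h1 : PySem.Str.startswith f (from_alias ++ "__") <;>
      simp only [h1, if_true, if_false, Bool.false_eq_true] <;>
    first
    | rfl
    | (by_cases h2 : PySem.Str.startswith f (rel_alias ++ "__") <;>
        simp only [h2, if_true, if_false, Bool.false_eq_true] <;>
       first
       | rfl
       | (by_cases h3 : PySem.Str.startswith f (to_alias ++ "__") <;>
           simp only [h3, if_true, if_false, Bool.false_eq_true] <;>
          first
          | rfl
          | (by_cases h4 : PySem.Str.startswith f "from__" <;>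
              simp only [h4, if_true, if_false, Bool.false_eq_true] <;>
             first
             | rfl
             | (by_cases h5 : PySem.Str.startswith f "rel__" <;>
                 simp only [h5, if_true, if_false, Bool.false_eq_true] <;>
                first
                | rfl
                | (by_cases h6 : PySem.Str.startswith f "to__" <;>
                    simp only [h6, if_true, if_false, Bool.false_eq_true] <;> rfl)))))

-- ===== VERDICT (by name: the statement is the Claim_ definition above) =====
theorem compile_traversal_select_clause_py_spec : Claim_equal_compile_traversal_select_clause_py := by
  intro fields from_alias rel_alias to_alias _
  unfold Spec_compile_traversal_select_clause_py
  unfold compile_traversal_select_clause_py compile_traversal_select_clause_py_alt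
  split
  · rfl
  · simp only [pv_fold_pass, pv_zipWith_map]
    exact congrArg (PySem.Str.join ", ")
      (List.map_congr_left (fun f _ => (pv_perField from_alias rel_alias to_alias f).symm))
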